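-- pv_equiv track=rewrite | github.com/CoderAnush/Compiling-Neural-Network-Models-Using-Automata-Theory | project/graph/extract_graph.py | extract_adjacency_from_trace
-- ===== SOURCE A (Python) =====
-- from typing import List, Dict, Tuple, Optional
-- from collections import OrderedDict
--
-- def extract_adjacency_from_trace(trace: List[str]) -> Dict[str, List[str]]:
--     """Convert an ordered trace into an adjacency list (simple chain graph).
--
--     Example:
--         trace = ["Input", "Conv", "ReLU", "MaxPool", "Flatten", "Dense", "Softmax", "Output"]
--         adjacency: {"Input": ["Conv"], "Conv": ["ReLU"], ...}
--     """
--     adj = OrderedDict()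
--     for i in range(len(trace) - 1):
--         src = trace[i]
--         dst = trace[i + 1]
--         adj.setdefault(src, [])
--         # avoid duplicates
--         if dst not in adj[src]:
--             adj[src].append(dst)
--     # ensure last node exists in dict with empty list
--     last = trace[-1]
--     adj.setdefault(last, [])
--     return adj
-- ===== SOURCE B (Python) =====
-- from typing import List, Dict
-- from collections import OrderedDict
--
-- def extract_adjacency_from_trace(trace: List[str]) -> Dict[str, List[str]]:
--     adj = OrderedDict()
--     # pass 1: raw multi-adjacency over consecutive pairs, duplicates kept
--     for src, dst in zip(trace, trace[1:]):
--         adj.setdefault(src, []).append(dst)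
--     # pass 2: dedup each list, keeping first occurrences in order
--     for k in adj:
--         adj[k] = list(dict.fromkeys(adj[k]))
--     adj.setdefault(trace[-1], [])
--     return adj
-- ===== Notes on version B (the rewrite author's own statement) =====
-- stated objective: alternative
-- what changed: B replaces A's single index loop with an inner membership test by two differently-shaped passes: zip over consecutive pairs collecting a raw multi-adjacency, then a rewrite pass deduplicating each list with dict.fromkeys; Pre_ excludes the empty trace, on which both raise IndexError.
import Mathlib
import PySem

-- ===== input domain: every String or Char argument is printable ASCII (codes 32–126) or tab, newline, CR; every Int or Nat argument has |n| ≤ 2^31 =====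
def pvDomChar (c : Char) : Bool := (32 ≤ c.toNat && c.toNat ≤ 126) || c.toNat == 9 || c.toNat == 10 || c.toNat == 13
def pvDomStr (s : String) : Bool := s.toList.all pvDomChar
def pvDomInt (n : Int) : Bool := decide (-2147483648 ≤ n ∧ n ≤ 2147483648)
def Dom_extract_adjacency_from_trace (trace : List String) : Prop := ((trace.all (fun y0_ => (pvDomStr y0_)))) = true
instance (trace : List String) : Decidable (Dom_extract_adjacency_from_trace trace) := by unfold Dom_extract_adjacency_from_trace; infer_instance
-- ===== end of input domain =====

-- B rewrites A's single index loop (membership test inside) as two passes: a raw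
-- multi-adjacency collected over zip(trace, trace[1:]), then a dedup rewrite of each
-- list; same result, objective: alternative decomposition.

-- ===== PORT A =====
def extract_adjacency_from_trace (trace : List String) : List (String × List String) :=
  let adj : PySem.Dict String (List String) :=
    (PySem.List.pyRange 0 ((trace.length : Int) - 1) 1).foldl (fun adj i =>
      let src := PySem.List.pyGetD trace i ""
      let dst := PySem.List.pyGetD trace (i + 1) ""
      let adj := adj.setdefault src []
      let cur := adj.getD src []
      if dst ∈ cur then adj else adj.insert src (cur ++ [dst])) PySem.Dict.empty
  let last := PySem.List.pyGetD trace (-1) ""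
  (adj.setdefault last []).items

-- ===== PORT B =====
def extract_adjacency_from_trace_alt (trace : List String) : List (String × List String) :=
  let adj : PySem.Dict String (List String) :=
    (trace.zip trace.tail).foldl (fun adj p =>
      adj.modify p.1 [] (· ++ [p.2])) PySem.Dict.empty
  let adj := PySem.Dict.mk (adj.items.map (fun p => (p.1, PySem.List.dedup p.2)))
  let last := PySem.List.pyGetD trace (-1) ""
  (adj.setdefault last []).items

-- ===== PRECONDITION & SPEC =====
-- Pre_ excludes only the empty trace, on which A (trace[-1]) raises IndexError.
def Pre_extract_adjacency_from_trace (trace : List String) : Prop := trace ≠ []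
instance (trace : List String) : Decidable (Pre_extract_adjacency_from_trace trace) := by unfold Pre_extract_adjacency_from_trace; infer_instance
def pvWitness_extract_adjacency_from_trace : List String := ["Input", "Conv", "ReLU", "Conv"]

def Spec_extract_adjacency_from_trace (trace : List String) (out : List (String × List String)) : Prop := out = extract_adjacency_from_trace_alt trace
instance (trace : List String) (out : List (String × List String)) : Decidable (Spec_extract_adjacency_from_trace trace out) := by unfold Spec_extract_adjacency_from_trace; infer_instance

-- ===== CLAIM (what is proved, stated in full; the proofs are below) =====
def Claim_equal_extract_adjacency_from_trace : Prop := ∀ (trace : List String), Dom_extract_adjacency_from_trace trace → Pre_extract_adjacency_from_trace trace → Spec_extract_adjacency_from_trace trace (extract_adjacency_from_trace trace)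

-- ===== LEMMAS AND PROOFS =====

-- value map applied to every entry by B's dedup pass
def pvDedupVal (p : String × List String) : String × List String := (p.1, PySem.List.dedup p.2)

-- A's loop body and B's first-pass loop body
def pvStepA (d : PySem.Dict String (List String)) (p : String × String) : PySem.Dict String (List String) :=
  let d := d.setdefault p.1 []
  let cur := d.getD p.1 []
  if p.2 ∈ cur then d else d.insert p.1 (cur ++ [p.2])

def pvStepB (d : PySem.Dict String (List String)) (p : String × String) : PySem.Dict String (List String) :=
  d.modify p.1 [] (· ++ [p.2])

lemma pv_get?_map_dedup (l : List (String × List String)) (k : String) :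
    (PySem.Dict.mk (l.map pvDedupVal)).get? k = ((PySem.Dict.mk l).get? k).map PySem.List.dedup := by
  induction l with
  | nil => rfl
  | cons p t ih =>
    simp only [List.map_cons, pvDedupVal]
    rw [PySem.Dict.get?_mk_cons, PySem.Dict.get?_mk_cons]
    by_cases h : (p.1 == k) = true
    · simp [h]
    · simp [h, ih]

lemma pv_dedup_snoc (v : List String) (t : String) :
    PySem.List.dedup (v ++ [t]) =
      if t ∈ PySem.List.dedup v then PySem.List.dedup v else PySem.List.dedup v ++ [t] := by
  simp [PySem.List.dedup_eq_ofList, PySem.Set.ofList_eq_foldl, List.foldl_append,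
    PySem.Set.add, PySem.Set.contains]

lemma pv_step (dA dB : PySem.Dict String (List String)) (p : String × String)
    (hnd : dB.keys.Nodup)
    (h : dA.items = dB.items.map pvDedupVal) :
    (pvStepA dA p).items = (pvStepB dB p).items.map pvDedupVal ∧ (pvStepB dB p).keys.Nodup := by
  have hAeq : dA = PySem.Dict.mk (dB.items.map pvDedupVal) := PySem.Dict.ext h
  subst hAeq
  have hkeys : (PySem.Dict.mk (dB.items.map pvDedupVal)).keys = dB.keys := by
    simp only [PySem.Dict.keys, List.map_map]
    exact List.map_congr_left (fun q _ => rfl)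
  have hcont : ∀ k, (PySem.Dict.mk (dB.items.map pvDedupVal)).contains k = dB.contains k := by
    intro k
    rw [PySem.Dict.contains_eq_decide_mem_keys, PySem.Dict.contains_eq_decide_mem_keys, hkeys]
  by_cases hc : dB.contains p.1 = true
  · -- key already present
    have hcA : (PySem.Dict.mk (dB.items.map pvDedupVal)).contains p.1 = true := by
      rw [hcont]; exact hc
    obtain ⟨v, hv⟩ : ∃ v, dB.get? p.1 = some v := by
      have := PySem.Dict.contains_eq_isSome_get? dB p.1
      rw [hc] at this
      exact Option.isSome_iff_exists.mp this.symm
    have hgA : (PySem.Dict.mk (dB.items.map pvDedupVal)).get? p.1 = some (PySem.List.dedup v) := by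
      have := pv_get?_map_dedup dB.items p.1
      simp only [PySem.Dict.mk.injEq] at this ⊢
      rw [this]
      cases dB with | mk l => simp only at hv ⊢; rw [hv]; rfl
    have hBitems : (pvStepB dB p).items =
        (dB.insert p.1 (v ++ [p.2])).items := by
      show (dB.insert p.1 (dB.getD p.1 [] ++ [p.2])).items = _
      rw [PySem.Dict.getD_of_get?_eq_some dB [] hv]
    have hBnodup : (pvStepB dB p).keys.Nodup := by
      have : (pvStepB dB p) = dB.insert p.1 (v ++ [p.2]) := by
        show dB.insert p.1 (dB.getD p.1 [] ++ [p.2]) = _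
        rw [PySem.Dict.getD_of_get?_eq_some dB [] hv]
      rw [this, PySem.Dict.keys_insert_of_contains dB _ hc]
      exact hnd
    refine ⟨?_, hBnodup⟩
    rw [hBitems, PySem.Dict.items_insert_of_contains dB _ hc, List.map_map]
    simp only [pvStepA, PySem.Dict.setdefault_of_contains _ _ hcA,
      PySem.Dict.getD_of_get?_eq_some _ [] hgA]
    by_cases hm : p.2 ∈ PySem.List.dedup v
    · simp only [hm, if_pos]
      show (PySem.Dict.mk (dB.items.map pvDedupVal)).items = _
      show dB.items.map pvDedupVal = _
      apply List.map_congr_left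
      intro q hq
      simp only [Function.comp_apply]
      by_cases hk : q.1 = p.1
      · have hq2 : q.2 = v := by
          have hmem : (q.1, q.2) ∈ dB.items := by simpa using hq
          have := PySem.Dict.get?_of_mem_items dB hmem hnd
          rw [hk, hv] at this
          exact (Option.some_inj.mp this).symm
        have hsnoc : PySem.List.dedup (v ++ [p.2]) = PySem.List.dedup v := by
          rw [pv_dedup_snoc, if_pos hm]
        simp only [PySem.List.dedup_eq_ofList] at hsnoc
        simp [pvDedupVal, hk, hq2, hsnoc]
      · simp [pvDedupVal, hk]
    · simp only [hm, if_neg, not_false_iff]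
      rw [PySem.Dict.items_insert_of_contains _ _ hcA, List.map_map]
      show dB.items.map _ = _
      have hsnoc : PySem.List.dedup (v ++ [p.2]) = PySem.List.dedup v ++ [p.2] := by
        rw [pv_dedup_snoc, if_neg hm]
      apply List.map_congr_left
      intro q hq
      simp only [PySem.List.dedup_eq_ofList] at hsnoc
      by_cases hk : q.1 = p.1
      · simp [pvDedupVal, hk, hsnoc]
      · simp [pvDedupVal, hk]
  · -- new key
    have hc' : dB.contains p.1 = false := by simpa using hc
    have hcA : (PySem.Dict.mk (dB.items.map pvDedupVal)).contains p.1 = false := by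
      rw [hcont]; exact hc'
    have hd1 : PySem.List.dedup [p.2] = [p.2] := by
      simp [PySem.List.dedup_eq_ofList, PySem.Set.ofList_eq_foldl, PySem.Set.add]
    have hA : (pvStepA (PySem.Dict.mk (dB.items.map pvDedupVal)) p) =
        (PySem.Dict.mk (dB.items.map pvDedupVal)).insert p.1 [p.2] := by
      simp only [pvStepA, PySem.Dict.setdefault_of_not_contains _ _ hcA,
        PySem.Dict.getD_insert_self, List.not_mem_nil, if_neg, List.nil_append,
        PySem.Dict.insert_insert_self, not_false_iff]
    have hB : (pvStepB dB p) = dB.insert p.1 [p.2] := by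
      show dB.insert p.1 (dB.getD p.1 [] ++ [p.2]) = _
      rw [PySem.Dict.getD_of_not_contains dB _ hc', List.nil_append]
    constructor
    · rw [hA, hB, PySem.Dict.items_insert_of_not_contains _ _ hcA,
        PySem.Dict.items_insert_of_not_contains _ _ hc', List.map_append]
      show dB.items.map pvDedupVal ++ [(p.1, [p.2])] = _
      simp [pvDedupVal, PySem.Set.ofList_eq_foldl, PySem.Set.add]
    · rw [hB, PySem.Dict.keys_insert_of_not_contains _ _ hc']
      have hnm : p.1 ∉ dB.keys := by
        have := PySem.Dict.contains_eq_decide_mem_keys dB p.1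
        rw [hc'] at this
        simpa using this.symm
      simp [List.nodup_append, hnd, hnm]
      intro a ha hh
      exact hnm (hh ▸ ha)

lemma pv_fold (l : List (String × String)) (dA dB : PySem.Dict String (List String))
    (hnd : dB.keys.Nodup) (h : dA.items = dB.items.map pvDedupVal) :
    (l.foldl pvStepA dA).items = (l.foldl pvStepB dB).items.map pvDedupVal ∧
      (l.foldl pvStepB dB).keys.Nodup := by
  induction l generalizing dA dB with
  | nil => exact ⟨h, hnd⟩
  | cons p t ih =>
    obtain ⟨h1, h2⟩ := pv_step dA dB p hnd h
    exact ih _ _ h2 h1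

-- A's index loop reads exactly the consecutive pairs
lemma pv_pairs (trace : List String) :
    (PySem.List.pyRange 0 ((trace.length : Int) - 1) 1).map
      (fun i => (PySem.List.pyGetD trace i "", PySem.List.pyGetD trace (i + 1) "")) =
    trace.zip trace.tail := by
  cases trace with
  | nil => rfl
  | cons a t =>
    have h1 : (((a :: t).length : Int) - 1) = ((t.length : Nat) : Int) := by
      simp only [List.length_cons]; push_cast; ring
    rw [h1, PySem.List.pyRange_zero_natCast, List.map_map]
    apply List.ext_getElem
    · simp
    · intro i hi1 hi2
      have hi : i < t.length := by simpa using hi1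
      have hcast : ((i : Int) + 1) = ((i + 1 : Nat) : Int) := by push_cast; ring
      simp only [List.getElem_map, List.getElem_range, Function.comp_apply, List.tail_cons,
        List.getElem_zip, hcast, PySem.List.pyGetD_natCast]
      refine Prod.ext ?_ ?_
      · simp only
        rw [List.getD_eq_getElem _ _ (by simp; omega)]
      · simp only
        rw [List.getD_eq_getElem _ _ (by simp; omega), List.getElem_cons_succ]

-- ===== VERDICT (by name: the statement is the Claim_ definition above) =====
theorem extract_adjacency_from_trace_spec : Claim_equal_extract_adjacency_from_trace := by
  intro trace _ hpre
  unfold Spec_extract_adjacency_from_trace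
  unfold extract_adjacency_from_trace extract_adjacency_from_trace_alt
  have hfold := pv_fold (trace.zip trace.tail) PySem.Dict.empty PySem.Dict.empty
      (by simp) (by rfl)
  have hA : (PySem.List.pyRange 0 ((trace.length : Int) - 1) 1).foldl
      (fun adj i =>
        let src := PySem.List.pyGetD trace i ""
        let dst := PySem.List.pyGetD trace (i + 1) ""
        let adj := adj.setdefault src []
        let cur := adj.getD src []
        if dst ∈ cur then adj else adj.insert src (cur ++ [dst])) PySem.Dict.empty
      = (trace.zip trace.tail).foldl pvStepA PySem.Dict.empty := by
    rw [← pv_pairs trace, List.foldl_map]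
    rfl
  have hB : (trace.zip trace.tail).foldl
      (fun adj (p : String × String) => adj.modify p.1 [] (· ++ [p.2])) PySem.Dict.empty
      = (trace.zip trace.tail).foldl pvStepB PySem.Dict.empty := rfl
  simp only [hA, hB]
  have : PySem.Dict.mk (((trace.zip trace.tail).foldl pvStepB PySem.Dict.empty).items.map
      (fun p => (p.1, PySem.List.dedup p.2))) = (trace.zip trace.tail).foldl pvStepA PySem.Dict.empty := by
    apply PySem.Dict.ext
    exact (hfold.1).symm
  rw [this]
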